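-- pv_equiv track=rewrite | github.com/konstantin1998/laboratory | interface/IQA/quality_estimator/sharpness.py | pick_pixels
-- ===== SOURCE A (Python) =====
-- def pick_pixels(arr, curr_pixel, direction, interval, reverse=False):
--     x, y = curr_pixel
--     if direction == 'up':
--         pixels = []
--         if not reverse:
--             for k in range(1, interval + 1):
--                 pixels.append(arr[x + k][y])
--         else:
--             for k in range(1, interval + 1):
--                 pixels.append(arr[x - k][y])
--         return pixels
--
--     if direction == 'up-right':
--         pixels = []
--         if not reverse:
--             for k in range(1, interval + 1):
--                 pixels.append(arr[x + k][y + k])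
--         else:
--             for k in range(1, interval + 1):
--                 pixels.append(arr[x - k][y - k])
--         return pixels
--
--     if direction == 'right':
--         if not reverse:
--             return arr[x][y + 1: y + interval + 1]
--         else:
--             return arr[x][y - interval: y]
--
--     if direction == 'down-right':
--         pixels = []
--         if not reverse:
--             for k in range(1, interval + 1):
--                 pixels.append(arr[x + k][y - k])
--         else:
--             for k in range(1, interval + 1):
--                 pixels.append(arr[x - k][y + k])
--         return pixels
--
--     if direction == 'down':
--         pixels = []
--         if not reverse:
--             for k in range(1, interval + 1):
--                 pixels.append(arr[x - k][y])
--         else: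
--             for k in range(1, interval + 1):
--                 pixels.append(arr[x + k][y])
--         return pixels
-- ===== SOURCE B (Python) =====
-- def _walk(arr, cx, cy, dx, dy, n):
--     # recursive cursor walk: step once, take the pixel, recurse on the rest
--     if n <= 0:
--         return []
--     cx += dx
--     cy += dy
--     return [arr[cx][cy]] + _walk(arr, cx, cy, dx, dy, n - 1)
--
--
-- def pick_pixels(arr, curr_pixel, direction, interval, reverse=False):
--     x, y = curr_pixel
--     if direction == 'right':
--         row = arr[x]
--         return row[y - interval: y] if reverse else row[y + 1: y + interval + 1]
--     s = -1 if reverse else 1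
--     if direction == 'up':
--         return _walk(arr, x, y, s, 0, interval)
--     if direction == 'up-right':
--         return _walk(arr, x, y, s, s, interval)
--     if direction == 'down-right':
--         return _walk(arr, x, y, s, -s, interval)
--     if direction == 'down':
--         return _walk(arr, x, y, -s, 0, interval)
-- ===== Notes on version B (the rewrite author's own statement) =====
-- stated objective: alternative
-- what changed: Replaces A's five branches with eight index-arithmetic loops (arr[x+k][y-k] recomputed from the origin each iteration) by one recursive helper _walk that carries a moving cursor, advances it by the step vector once per call and conses up the result; only 'right' keeps A's two slicing expressions since slicing has different boundary behaviour.
import Mathlib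
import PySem

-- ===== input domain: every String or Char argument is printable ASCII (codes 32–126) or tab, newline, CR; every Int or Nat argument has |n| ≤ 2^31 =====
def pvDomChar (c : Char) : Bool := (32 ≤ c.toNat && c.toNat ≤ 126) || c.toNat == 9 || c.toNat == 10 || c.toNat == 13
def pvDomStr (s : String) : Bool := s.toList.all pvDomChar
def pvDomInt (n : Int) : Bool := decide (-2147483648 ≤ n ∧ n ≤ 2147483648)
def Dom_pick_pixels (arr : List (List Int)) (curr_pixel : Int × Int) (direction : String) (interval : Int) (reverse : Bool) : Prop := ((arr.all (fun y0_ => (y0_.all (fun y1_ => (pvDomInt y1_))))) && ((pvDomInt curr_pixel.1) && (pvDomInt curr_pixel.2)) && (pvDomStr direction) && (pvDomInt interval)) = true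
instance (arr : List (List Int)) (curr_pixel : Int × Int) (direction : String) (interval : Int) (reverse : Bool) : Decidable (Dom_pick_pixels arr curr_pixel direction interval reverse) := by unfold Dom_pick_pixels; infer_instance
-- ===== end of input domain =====

-- B replaces A's five per-direction branches (eight hand-written index loops) by a single
-- recursive cursor walk (_walk) that advances one step vector at a time; 'right' keeps A's
-- slicing. Objective: alternative decomposition (recursive walk vs indexed loops), same cost.


-- ===== PORT A =====
-- arr[i][j] is ported as pyGetD (default values); Pre_pick_pixels restricts to the inputs
-- where every such access is in range (elsewhere Python raises IndexError).
def pick_pixels (arr : List (List Int)) (curr_pixel : Int × Int) (direction : String) (interval : Int) (reverse : Bool) : Option (List Int) :=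
  let x := curr_pixel.1
  let y := curr_pixel.2
  if direction == "up" then
    some (if !reverse then
      (PySem.List.pyRange 1 (interval + 1) 1).foldl (fun pixels k => pixels ++ [PySem.List.pyGetD (PySem.List.pyGetD arr (x + k) []) y 0]) []
    else
      (PySem.List.pyRange 1 (interval + 1) 1).foldl (fun pixels k => pixels ++ [PySem.List.pyGetD (PySem.List.pyGetD arr (x - k) []) y 0]) [])
  else if direction == "up-right" then
    some (if !reverse then
      (PySem.List.pyRange 1 (interval + 1) 1).foldl (fun pixels k => pixels ++ [PySem.List.pyGetD (PySem.List.pyGetD arr (x + k) []) (y + k) 0]) []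
    else
      (PySem.List.pyRange 1 (interval + 1) 1).foldl (fun pixels k => pixels ++ [PySem.List.pyGetD (PySem.List.pyGetD arr (x - k) []) (y - k) 0]) [])
  else if direction == "right" then
    some (if !reverse then
      PySem.List.slice (PySem.List.pyGetD arr x []) (some (y + 1)) (some (y + interval + 1))
    else
      PySem.List.slice (PySem.List.pyGetD arr x []) (some (y - interval)) (some y))
  else if direction == "down-right" then
    some (if !reverse then
      (PySem.List.pyRange 1 (interval + 1) 1).foldl (fun pixels k => pixels ++ [PySem.List.pyGetD (PySem.List.pyGetD arr (x + k) []) (y - k) 0]) []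
    else
      (PySem.List.pyRange 1 (interval + 1) 1).foldl (fun pixels k => pixels ++ [PySem.List.pyGetD (PySem.List.pyGetD arr (x - k) []) (y + k) 0]) [])
  else if direction == "down" then
    some (if !reverse then
      (PySem.List.pyRange 1 (interval + 1) 1).foldl (fun pixels k => pixels ++ [PySem.List.pyGetD (PySem.List.pyGetD arr (x - k) []) y 0]) []
    else
      (PySem.List.pyRange 1 (interval + 1) 1).foldl (fun pixels k => pixels ++ [PySem.List.pyGetD (PySem.List.pyGetD arr (x + k) []) y 0]) [])
  else none

-- ===== PORT B =====
-- _walk of Source B: Python recurses on an int n with an 'n <= 0' base case, which is exactly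
-- structural recursion on n.toNat here (n ≤ 0 ↔ n.toNat = 0 for the fuel passed in).
def pickWalk (arr : List (List Int)) (cx cy dx dy : Int) : Nat → List Int
  | 0 => []
  | n + 1 =>
      [PySem.List.pyGetD (PySem.List.pyGetD arr (cx + dx) []) (cy + dy) 0]
        ++ pickWalk arr (cx + dx) (cy + dy) dx dy n

def pick_pixels_alt (arr : List (List Int)) (curr_pixel : Int × Int) (direction : String) (interval : Int) (reverse : Bool) : Option (List Int) :=
  let x := curr_pixel.1
  let y := curr_pixel.2
  if direction == "right" then
    let row := PySem.List.pyGetD arr x []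
    if reverse then
      some (PySem.List.slice row (some (y - interval)) (some y))
    else
      some (PySem.List.slice row (some (y + 1)) (some (y + interval + 1)))
  else
    let s : Int := if reverse then -1 else 1
    if direction == "up" then
      some (pickWalk arr x y s 0 interval.toNat)
    else if direction == "up-right" then
      some (pickWalk arr x y s s interval.toNat)
    else if direction == "down-right" then
      some (pickWalk arr x y s (-s) interval.toNat)
    else if direction == "down" then
      some (pickWalk arr x y (-s) 0 interval.toNat)
    else none

-- ===== PRECONDITION & SPEC =====
-- helper: arr[i][j] does not raise (Python negative indexing allowed)
def pvIn (arr : List (List Int)) (i j : Int) : Prop :=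
  PySem.Raise.InRange arr.length i ∧ PySem.Raise.InRange (PySem.List.pyGetD arr i []).length j

-- Pre_ excludes exactly the inputs on which Python A raises IndexError: some arr[·][·]
-- access of the chosen direction (or arr[x] for 'right') is out of range.
def Pre_pick_pixels (arr : List (List Int)) (curr_pixel : Int × Int) (direction : String) (interval : Int) (reverse : Bool) : Prop :=
  (direction = "up" → ∀ k ∈ PySem.List.pyRange 1 (interval + 1) 1,
      pvIn arr (if reverse then curr_pixel.1 - k else curr_pixel.1 + k) curr_pixel.2) ∧
  (direction = "up-right" → ∀ k ∈ PySem.List.pyRange 1 (interval + 1) 1,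
      pvIn arr (if reverse then curr_pixel.1 - k else curr_pixel.1 + k)
               (if reverse then curr_pixel.2 - k else curr_pixel.2 + k)) ∧
  (direction = "right" → PySem.Raise.InRange arr.length curr_pixel.1) ∧
  (direction = "down-right" → ∀ k ∈ PySem.List.pyRange 1 (interval + 1) 1,
      pvIn arr (if reverse then curr_pixel.1 - k else curr_pixel.1 + k)
               (if reverse then curr_pixel.2 + k else curr_pixel.2 - k)) ∧
  (direction = "down" → ∀ k ∈ PySem.List.pyRange 1 (interval + 1) 1,
      pvIn arr (if reverse then curr_pixel.1 + k else curr_pixel.1 - k) curr_pixel.2)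

instance (arr : List (List Int)) (curr_pixel : Int × Int) (direction : String) (interval : Int) (reverse : Bool) : Decidable (Pre_pick_pixels arr curr_pixel direction interval reverse) := by unfold Pre_pick_pixels pvIn; infer_instance

def pvWitness_pick_pixels : List (List Int) × (Int × Int) × String × Int × Bool :=
  ([[1, 2], [3, 4]], (0, 0), "up", 1, false)

def Spec_pick_pixels (arr : List (List Int)) (curr_pixel : Int × Int) (direction : String) (interval : Int) (reverse : Bool) (out : Option (List Int)) : Prop := out = pick_pixels_alt arr curr_pixel direction interval reverse
instance (arr : List (List Int)) (curr_pixel : Int × Int) (direction : String) (interval : Int) (reverse : Bool) (out : Option (List Int)) : Decidable (Spec_pick_pixels arr curr_pixel direction interval reverse out) := by unfold Spec_pick_pixels; infer_instance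

-- ===== CLAIM (what is proved, stated in full; the proofs are below) =====
def Claim_equal_pick_pixels : Prop := ∀ (arr : List (List Int)) (curr_pixel : Int × Int) (direction : String) (interval : Int) (reverse : Bool), Dom_pick_pixels arr curr_pixel direction interval reverse → Pre_pick_pixels arr curr_pixel direction interval reverse → Spec_pick_pixels arr curr_pixel direction interval reverse (pick_pixels arr curr_pixel direction interval reverse)

-- ===== LEMMAS AND PROOFS =====
-- A's append loop over range(1, n+1) (after simp turns it into flatten-of-singletons),
-- as a map over List.range
theorem pv_flat_range (g : Int → Int) (n : Int) :
    ((PySem.List.pyRange 1 (n+1) 1).map (fun k => [g k])).flatten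
      = (List.range n.toNat).map (fun i : Nat => g ((i:Int)+1)) := by
  rw [PySem.List.pyRange_one, List.map_map]
  have h : (n + 1 - 1).toNat = n.toNat := by omega
  rw [h]
  induction (List.range n.toNat) with
  | nil => rfl
  | cons a l ih => exact by simpa using ⟨by rw [add_comm], ih⟩

-- the walk, unrolled: pixel i of the walk sits at (cx + (i+1)*dx, cy + (i+1)*dy)
theorem pickWalk_eq_map (arr : List (List Int)) (dx dy : Int) :
    ∀ (n : Nat) (cx cy : Int),
      pickWalk arr cx cy dx dy n
        = (List.range n).map (fun i : Nat =>
            PySem.List.pyGetD (PySem.List.pyGetD arr (cx + ((i : Int) + 1) * dx) [])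
              (cy + ((i : Int) + 1) * dy) 0) := by
  intro n
  induction n with
  | zero => intro cx cy; simp [pickWalk]
  | succ n ih =>
      intro cx cy
      rw [pickWalk, ih, List.range_succ_eq_map, List.map_cons, List.map_map,
        List.singleton_append]
      refine congrArg₂ _ (by norm_num) ?_
      refine List.map_congr_left fun i _ => ?_
      show PySem.List.pyGetD (PySem.List.pyGetD arr (cx + dx + ((i:Int)+1)*dx) []) (cy + dy + ((i:Int)+1)*dy) 0
     = PySem.List.pyGetD (PySem.List.pyGetD arr (cx + (((i:Nat).succ : Int)+1)*dx) []) (cy + (((i:Nat).succ : Int)+1)*dy) 0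
      push_cast
      ring_nf

-- ===== VERDICT (by name: the statement is the Claim_ definition above) =====
theorem pick_pixels_spec : Claim_equal_pick_pixels := by
  unfold Claim_equal_pick_pixels
  intro arr cp direction interval reverse _ _
  unfold Spec_pick_pixels pick_pixels pick_pixels_alt
  by_cases h1 : direction = "up"
  · subst h1
    cases reverse <;>
      (simp [pickWalk_eq_map, sub_eq_add_neg] <;>
        (rw [pv_flat_range]; try exact List.map_congr_left fun i _ => by ring_nf))
  by_cases h2 : direction = "up-right"
  · subst h2
    cases reverse <;>
      (simp [pickWalk_eq_map, sub_eq_add_neg] <;>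
        (rw [pv_flat_range]; try exact List.map_congr_left fun i _ => by ring_nf))
  by_cases h3 : direction = "right"
  · subst h3
    cases reverse <;> simp
  by_cases h4 : direction = "down-right"
  · subst h4
    cases reverse <;>
      (simp [pickWalk_eq_map, sub_eq_add_neg] <;>
        (rw [pv_flat_range]; try exact List.map_congr_left fun i _ => by ring_nf))
  by_cases h5 : direction = "down"
  · subst h5
    cases reverse <;>
      (simp [pickWalk_eq_map, sub_eq_add_neg] <;>
        (rw [pv_flat_range]; try exact List.map_congr_left fun i _ => by ring_nf))
  · simp [h1, h2, h3, h4, h5]
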